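-- pv_equiv track=rewrite | github.com/YisusChrist/adventofcode-2024 | 09/solution.py | create_disk_map_2
-- ===== SOURCE A (Python) =====
-- def create_disk_map_2(blocks_map: list[int]) -> list[int | None]:
--     """
--     Given the blocks map, create the disk map
--     """
--     disk_map: list[int | None] = []
--     head = 0
--     for i, n in enumerate(blocks_map):
--         if not i % 2:
--             disk_map.append((i // 2, head, head + n))
--         head += n
--
--     return disk_map
-- ===== SOURCE B (Python) =====
-- def create_disk_map_2(blocks_map: list[int]) -> list[int | None]:
--     """
--     Given the blocks map, create the disk map
--     """
--     starts = [0]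
--     for n in blocks_map:
--         starts.append(starts[-1] + n)
--     return [(i // 2, starts[i], starts[i + 1]) for i in range(0, len(blocks_map), 2)]
-- ===== Notes on version B (the rewrite author's own statement) =====
-- stated objective: alternative
-- what changed: Replaces the single pass with a running head accumulator and a parity-conditional append by two differently shaped passes: first build a prefix-sum table of block starts, then emit (i//2, starts[i], starts[i+1]) for the even indices only.
import Mathlib
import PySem

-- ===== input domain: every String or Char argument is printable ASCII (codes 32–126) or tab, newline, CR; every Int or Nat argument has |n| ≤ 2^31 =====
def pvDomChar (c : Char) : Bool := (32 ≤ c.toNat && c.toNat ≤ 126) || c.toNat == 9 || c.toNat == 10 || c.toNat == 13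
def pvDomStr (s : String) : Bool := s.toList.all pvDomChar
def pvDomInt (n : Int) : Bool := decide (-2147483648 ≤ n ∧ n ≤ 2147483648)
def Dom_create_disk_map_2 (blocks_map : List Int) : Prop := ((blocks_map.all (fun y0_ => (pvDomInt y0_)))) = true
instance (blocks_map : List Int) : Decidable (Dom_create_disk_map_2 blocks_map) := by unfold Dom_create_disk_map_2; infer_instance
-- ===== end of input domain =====

-- B builds a prefix-sum table of block starts first, then emits the even-index
-- triples from that table (alternative decomposition; return value only).

-- ===== PORT A =====
-- the for-loop of A: state (i, head, disk_map), branch on i % 2, head += n each step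
def createDiskMap2Loop : List Int → Int → Int → List (Int × Int × Int) → List (Int × Int × Int)
  | [], _, _, dm => dm
  | n :: rest, i, head, dm =>
      createDiskMap2Loop rest (i + 1) (head + n)
        (if PySem.Int.mod i 2 == 0 then dm ++ [(PySem.Int.floordiv i 2, head, head + n)] else dm)

def create_disk_map_2 (blocks_map : List Int) : List (Int × Int × Int) :=
  createDiskMap2Loop blocks_map 0 0 []

-- ===== PORT B =====
-- Source B's first loop: starts.append(starts[-1] + n)
def createDiskMap2AltStarts : List Int → List Int → List Int
  | [], acc => acc
  | n :: rest, acc => createDiskMap2AltStarts rest (acc ++ [PySem.List.pyGetD acc (-1) 0 + n])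

def create_disk_map_2_alt (blocks_map : List Int) : List (Int × Int × Int) :=
  let starts := createDiskMap2AltStarts blocks_map [0]
  (PySem.List.pyRange 0 (blocks_map.length : Int) 2).map
    (fun i => (PySem.Int.floordiv i 2, PySem.List.pyGetD starts i 0, PySem.List.pyGetD starts (i + 1) 0))

-- ===== PRECONDITION & SPEC =====
def Spec_create_disk_map_2 (blocks_map : List Int) (out : List (Int × Int × Int)) : Prop := out = create_disk_map_2_alt blocks_map
instance (blocks_map : List Int) (out : List (Int × Int × Int)) : Decidable (Spec_create_disk_map_2 blocks_map out) := by unfold Spec_create_disk_map_2; infer_instance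

-- ===== CLAIM (what is proved, stated in full; the proofs are below) =====
def Claim_equal_create_disk_map_2 : Prop := ∀ (blocks_map : List Int), Dom_create_disk_map_2 blocks_map → Spec_create_disk_map_2 blocks_map (create_disk_map_2 blocks_map)

-- ===== LEMMAS AND PROOFS =====

-- common two-at-a-time specification of the result
def gSpec : List Int → Int → Int → List (Int × Int × Int)
  | [], _, _ => []
  | [a], id, head => [(id, head, head + a)]
  | a :: b :: rest, id, head => (id, head, head + a) :: gSpec rest (id + 1) (head + a + b)

-- prefix sums of bm starting after offset h (without the leading h)
def psums : Int → List Int → List Int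
  | _, [] => []
  | h, n :: rest => (h + n) :: psums (h + n) rest

theorem mod_two_mul (k : Int) : PySem.Int.mod (2 * k) 2 = 0 := by
  rw [PySem.Int.mod_eq_emod_of_pos (by norm_num)]; omega

theorem mod_two_mul_add_one (k : Int) : PySem.Int.mod (2 * k + 1) 2 = 1 := by
  rw [PySem.Int.mod_eq_emod_of_pos (by norm_num)]; omega

theorem floordiv_two_mul (k : Int) : PySem.Int.floordiv (2 * k) 2 = k := by
  rw [PySem.Int.floordiv_eq_ediv_of_pos (by norm_num)]
  exact Int.mul_ediv_cancel_left k (by norm_num)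

theorem aloop_eq : ∀ (bm : List Int) (k head : Int) (dm : List (Int × Int × Int)),
    createDiskMap2Loop bm (2 * k) head dm = dm ++ gSpec bm k head
  | [], k, h, dm => by simp [createDiskMap2Loop, gSpec]
  | [a], k, h, dm => by
      simp [createDiskMap2Loop, gSpec]
  | a :: b :: rest, k, h, dm => by
      show createDiskMap2Loop (b :: rest) (2 * k + 1) (h + a)
            (if PySem.Int.mod (2 * k) 2 == 0 then dm ++ [(PySem.Int.floordiv (2 * k) 2, h, h + a)] else dm)
          = dm ++ gSpec (a :: b :: rest) k h
      rw [mod_two_mul, floordiv_two_mul]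
      show createDiskMap2Loop rest (2 * k + 1 + 1) (h + a + b)
            (if PySem.Int.mod (2 * k + 1) 2 == 0
              then (dm ++ [(k, h, h + a)]) ++ [(PySem.Int.floordiv (2 * k + 1) 2, h + a, h + a + b)]
              else dm ++ [(k, h, h + a)])
          = dm ++ gSpec (a :: b :: rest) k h
      rw [mod_two_mul_add_one]
      have h2 : 2 * k + 1 + 1 = 2 * (k + 1) := by ring
      rw [if_neg (by decide), h2, aloop_eq rest (k + 1) (h + a + b) (dm ++ [(k, h, h + a)])]
      simp [gSpec]

theorem a_eq_gSpec (bm : List Int) : create_disk_map_2 bm = gSpec bm 0 0 := by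
  have := aloop_eq bm 0 0 []
  simpa [create_disk_map_2] using this

theorem alt_starts_eq : ∀ (bm acc : List Int) (h : acc ≠ []),
    createDiskMap2AltStarts bm acc = acc ++ psums (acc.getLast h) bm
  | [], acc, h => by simp [createDiskMap2AltStarts, psums]
  | n :: rest, acc, h => by
      show createDiskMap2AltStarts rest (acc ++ [PySem.List.pyGetD acc (-1) 0 + n]) = _
      rw [PySem.List.pyGetD_neg_one acc 0 h]
      rw [alt_starts_eq rest (acc ++ [acc.getLast h + n]) (by simp)]
      simp [psums]

-- B's comprehension, rephrased over Nat range, equals gSpec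
theorem b_range_eq : ∀ (bm : List Int) (k0 h : Int),
    (List.range ((bm.length + 1) / 2)).map
      (fun (k : Nat) => (k0 + (k : Int), (h :: psums h bm).getD (2 * k) 0, (h :: psums h bm).getD (2 * k + 1) 0))
    = gSpec bm k0 h
  | [], k0, h => by simp [gSpec]
  | [a], k0, h => by simp [gSpec, psums]
  | a :: b :: rest, k0, h => by
      have hlen : ((a :: b :: rest).length + 1) / 2 = ((rest.length + 1) / 2) + 1 := by
        simp; omega
      rw [hlen, List.range_succ_eq_map, List.map_cons, List.map_map]
      have hmap : ((List.range ((rest.length + 1) / 2)).map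
            ((fun (k : Nat) => (k0 + (k : Int), (h :: psums h (a :: b :: rest)).getD (2 * k) 0,
               (h :: psums h (a :: b :: rest)).getD (2 * k + 1) 0)) ∘ Nat.succ))
          = (List.range ((rest.length + 1) / 2)).map
            (fun (k : Nat) => ((k0 + 1) + (k : Int), ((h + a + b) :: psums (h + a + b) rest).getD (2 * k) 0,
               ((h + a + b) :: psums (h + a + b) rest).getD (2 * k + 1) 0)) := by
        apply List.map_congr_left
        intro k _
        simp only [Function.comp, psums, Prod.mk.injEq]
        refine ⟨?_, ?_, ?_⟩
        · push_cast [Nat.succ_eq_add_one]; ring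
        · have e1 : 2 * Nat.succ k = (2 * k + 1) + 1 := by omega
          rw [e1, List.getD_cons_succ, List.getD_cons_succ]
        · have e2 : 2 * Nat.succ k + 1 = ((2 * k + 1) + 1) + 1 := by omega
          rw [e2, List.getD_cons_succ, List.getD_cons_succ]
      rw [hmap, b_range_eq rest (k0 + 1) (h + a + b)]
      simp [gSpec, psums]

theorem b_eq_gSpec (bm : List Int) : create_disk_map_2_alt bm = gSpec bm 0 0 := by
  unfold create_disk_map_2_alt
  have hs : createDiskMap2AltStarts bm [0] = 0 :: psums 0 bm := by
    simpa using alt_starts_eq bm [0] (by simp)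
  rw [hs]
  rw [PySem.List.pyRange_of_pos 0 (bm.length : Int) (by norm_num : (0:Int) < 2)]
  have hcnt : (if (0:Int) < (bm.length : Int) then (((bm.length : Int) - 0 + 2 - 1) / 2).toNat else 0)
      = (bm.length + 1) / 2 := by
    split_ifs with hpos <;> omega
  rw [hcnt, List.map_map]
  rw [← b_range_eq bm 0 0]
  apply List.map_congr_left
  intro k _
  simp only [Function.comp, zero_add, Prod.mk.injEq]
  refine ⟨?_, ?_, ?_⟩
  · rw [show (2 * (k : Int)) = ((2 * k : Nat) : Int) by push_cast; ring]
    simp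
  · rw [show (2 * (k : Int)) = ((2 * k : Nat) : Int) by push_cast; ring,
        PySem.List.pyGetD_natCast]
  · rw [show (2 * (k : Int) + 1) = ((2 * k + 1 : Nat) : Int) by push_cast; ring,
        PySem.List.pyGetD_natCast]

-- ===== VERDICT (by name: the statement is the Claim_ definition above) =====
theorem create_disk_map_2_spec : Claim_equal_create_disk_map_2 := by
  intro bm _
  unfold Spec_create_disk_map_2
  rw [a_eq_gSpec, b_eq_gSpec]
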